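-- pv_equiv track=rewrite | github.com/TejasviUpadhyay1907/signalforge-ai | et_backend/insights/insight_generator.py | get_insight_priority
-- ===== SOURCE A (Python) =====
-- def get_insight_priority(insight: str) -> int:
--     """
--     Get priority level for insight ranking.
--
--     Args:
--         insight: Insight string
--
--     Returns:
--         Priority score (higher = more important)
--     """
--     high_priority_keywords = [
--         "strong breakout", "strong momentum", "early breakout",
--         "momentum building", "breakout confirmation"
--     ]
--
--     medium_priority_keywords = [
--         "watch momentum", "potential breakout", "momentum buildup"
--     ]
--
--     insight_lower = insight.lower()
--
--     for keyword in high_priority_keywords: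
--         if keyword in insight_lower:
--             return 3
--
--     for keyword in medium_priority_keywords:
--         if keyword in insight_lower:
--             return 2
--
--     return 1
-- ===== SOURCE B (Python) =====
-- def get_insight_priority(insight: str) -> int:
--     """Get priority level for insight ranking (naive multi-pattern position scan)."""
--     scored_keywords = [
--         ("strong breakout", 3), ("strong momentum", 3), ("early breakout", 3),
--         ("momentum building", 3), ("breakout confirmation", 3),
--         ("watch momentum", 2), ("potential breakout", 2), ("momentum buildup", 2),
--     ]
--     s = insight.lower()
--     best = 1
--     for i in range(len(s)):
--         for keyword, score in scored_keywords:
--             if s[i:i + len(keyword)] == keyword: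
--                 if score > best:
--                     best = score
--     return best
-- ===== Notes on version B (the rewrite author's own statement) =====
-- stated objective: alternative
-- what changed: Replaces A's keyword-driven scans using the substring operator by a naive multi-pattern matcher: one outer pass over every start position of the lowercased string, comparing the slice at that position against a unified (keyword, score) table while keeping a running best score.
import Mathlib
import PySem

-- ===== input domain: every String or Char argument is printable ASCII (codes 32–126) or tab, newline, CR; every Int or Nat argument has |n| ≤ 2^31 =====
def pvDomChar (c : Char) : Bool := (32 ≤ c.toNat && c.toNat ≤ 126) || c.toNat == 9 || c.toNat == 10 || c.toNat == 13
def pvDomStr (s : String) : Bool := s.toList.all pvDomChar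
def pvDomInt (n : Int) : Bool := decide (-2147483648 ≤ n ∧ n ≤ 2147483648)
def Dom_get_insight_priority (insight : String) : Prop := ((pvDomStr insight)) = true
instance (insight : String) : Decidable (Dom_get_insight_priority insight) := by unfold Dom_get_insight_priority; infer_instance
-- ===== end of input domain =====

-- B replaces A's two keyword-driven short-circuit `in` scans by a naive multi-pattern position scan: one pass over every start position of the lowercased string, comparing the slice there against a unified (keyword, score) table with a running best (alternative algorithm, same result).


-- ===== PORT A =====
-- 'for keyword in ks: if keyword in l: return <v>' loop with early return
def pvFirstHit : List String → String → Bool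
  | [], _ => false
  | k :: rest, l => if PySem.Str.isIn k l then true else pvFirstHit rest l

def pvHigh : List String :=
  ["strong breakout", "strong momentum", "early breakout",
   "momentum building", "breakout confirmation"]

def pvMedium : List String :=
  ["watch momentum", "potential breakout", "momentum buildup"]

def get_insight_priority (insight : String) : Int :=
  let insight_lower := PySem.Str.lower insight
  if pvFirstHit pvHigh insight_lower then 3
  else if pvFirstHit pvMedium insight_lower then 2
  else 1

-- ===== PORT B =====
def pvScored : List (String × Int) :=
  [("strong breakout", 3), ("strong momentum", 3), ("early breakout", 3),
   ("momentum building", 3), ("breakout confirmation", 3),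
   ("watch momentum", 2), ("potential breakout", 2), ("momentum buildup", 2)]

def get_insight_priority_alt (insight : String) : Int :=
  let s := PySem.Str.lower insight
  (PySem.List.pyRange 0 (PySem.Str.len s) 1).foldl (fun best i =>
    pvScored.foldl (fun best p =>
      if PySem.Str.slice s (some i) (some (i + PySem.Str.len p.1)) = p.1 then
        (if p.2 > best then p.2 else best)
      else best) best) 1

-- ===== PRECONDITION & SPEC =====
def Spec_get_insight_priority (insight : String) (out : Int) : Prop := out = get_insight_priority_alt insight
instance (insight : String) (out : Int) : Decidable (Spec_get_insight_priority insight out) := by unfold Spec_get_insight_priority; infer_instance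

-- ===== CLAIM (what is proved, stated in full; the proofs are below) =====
def Claim_equal_get_insight_priority : Prop := ∀ (insight : String), Dom_get_insight_priority insight → Spec_get_insight_priority insight (get_insight_priority insight)

-- ===== LEMMAS AND PROOFS =====

-- 'the slice of t starting at i matches kw' — B's inner comparison
abbrev pvM (t : String) (i : Int) (kw : String) : Prop :=
  PySem.Str.slice t (some i) (some (i + PySem.Str.len kw)) = kw

-- the inner table pass at one position, as a three-way conditional max
theorem pv_inner (c1 c2 c3 c4 c5 c6 c7 c8 : Prop)
    [Decidable c1] [Decidable c2] [Decidable c3] [Decidable c4] [Decidable c5]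
    [Decidable c6] [Decidable c7] [Decidable c8] (best : Int) :
    (let b1 := if c1 then (if 3 > best then 3 else best) else best
     let b2 := if c2 then (if 3 > b1 then 3 else b1) else b1
     let b3 := if c3 then (if 3 > b2 then 3 else b2) else b2
     let b4 := if c4 then (if 3 > b3 then 3 else b3) else b3
     let b5 := if c5 then (if 3 > b4 then 3 else b4) else b4
     let b6 := if c6 then (if 2 > b5 then 2 else b5) else b5
     let b7 := if c7 then (if 2 > b6 then 2 else b6) else b6
     if c8 then (if 2 > b7 then 2 else b7) else b7)
    = if c1 ∨ c2 ∨ c3 ∨ c4 ∨ c5 then max best 3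
      else if c6 ∨ c7 ∨ c8 then max best 2 else best := by
  have step : ∀ (c : Prop) (inst : Decidable c) (v b : Int),
      (if c then (if v > b then v else b) else b) = if c then max b v else b := by
    intro c inst v b
    split_ifs <;> omega
  simp only [step]
  have grow : ∀ (c d : Prop) (ic : Decidable c) (id : Decidable d) (v b : Int),
      (if d then max (if c then max b v else b) v else (if c then max b v else b))
        = if c ∨ d then max b v else b := by
    intro c d ic id v b
    by_cases hc : c <;> by_cases hd : d <;> simp [hc, hd]
  simp only [grow, or_assoc]
  by_cases hC : c1 ∨ c2 ∨ c3 ∨ c4 ∨ c5 <;>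
    simp only [hC, if_true, if_false] <;>
    (try simp only [grow, or_assoc]) <;>
    (try split_ifs) <;> omega

-- the position pass, for any step of this three-way shape
theorem pv_outer (H M : Int → Prop) [DecidablePred H] [DecidablePred M]
    (R : List Int) (best : Int) :
    R.foldl (fun b i => if H i then max b 3 else if M i then max b 2 else b) best
    = if R.any (fun i => decide (H i)) then max best 3
      else if R.any (fun i => decide (M i)) then max best 2 else best := by
  induction R generalizing best with
  | nil => simp
  | cons i R ih =>
    simp only [List.foldl_cons, List.any_cons, ih]
    by_cases hH : H i <;> by_cases hM : M i <;>
      simp [hH, hM, Int.max_def] <;> split_ifs <;> omega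

-- any distributes over || pointwise
theorem pv_any_split (R : List Int) (p q : Int → Bool) :
    R.any (fun i => p i || q i) = (R.any p || R.any q) := by
  induction R with
  | nil => rfl
  | cons a R ih => simp only [List.any_cons, ih, Bool.or_assoc, Bool.or_left_comm]

-- position-wise slice match over the full range is exactly substring containment (list level)
theorem pv_any (l kw : List Char) (hkw : kw ≠ []) :
    ((PySem.List.pyRange 0 (l.length : Int) 1).any
        (fun i => decide (PySem.List.slice l (some i) (some (i + (kw.length : Int))) = kw)))
    = PySem.Chars.isIn kw l := by
  rcases h : PySem.Chars.isIn kw l with _ | _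
  · rw [List.any_eq_false]
    intro i hi
    rw [PySem.List.mem_pyRange_one] at hi
    obtain ⟨j, rfl⟩ : ∃ j : Nat, (j : Int) = i := ⟨i.toNat, by omega⟩
    simp only [decide_eq_true_eq, PySem.List.slice_natCast_add]
    intro hsl
    have : kw <+: l.drop j := List.prefix_iff_eq_take.mpr hsl.symm
    have := (PySem.Chars.exists_prefix_drop_iff_isIn kw l).mp ⟨j, this⟩
    simp [h] at this
  · rw [List.any_eq_true]
    obtain ⟨j, hj⟩ := (PySem.Chars.exists_prefix_drop_iff_isIn kw l).mpr h
    have hjlt : j < l.length := by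
      by_contra hle
      rw [List.drop_eq_nil_of_le (by omega)] at hj
      exact hkw (List.prefix_nil.mp hj)
    refine ⟨(j : Int), ?_, ?_⟩
    · rw [PySem.List.mem_pyRange_one]; omega
    · simp only [decide_eq_true_eq, PySem.List.slice_natCast_add]
      rw [List.prefix_iff_eq_take] at hj
      exact hj.symm

-- same, at the String level of the ports
theorem pv_any_str (t kw : String) (h : kw.toList ≠ []) :
    ((PySem.List.pyRange 0 (PySem.Str.len t) 1).any
        (fun i => decide (pvM t i kw)))
    = PySem.Str.isIn kw t := by
  rw [PySem.Str.isIn_eq, PySem.Str.len_eq t, ← pv_any t.toList kw.toList h]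
  congr 1
  funext i
  simp only [pvM, PySem.Str.len_eq, ← String.toList_inj,
    PySem.Str.toList_slice, PySem.Chars.slice_eq_listSlice]

-- ===== VERDICT (by name: the statement is the Claim_ definition above) =====
theorem get_insight_priority_spec : Claim_equal_get_insight_priority := by
  intro insight _
  unfold Spec_get_insight_priority get_insight_priority get_insight_priority_alt
  generalize PySem.Str.lower insight = t
  dsimp only
  have hstep : (fun (best i : Int) =>
      pvScored.foldl (fun best p =>
        if PySem.Str.slice t (some i) (some (i + PySem.Str.len p.1)) = p.1 then
          (if p.2 > best then p.2 else best) else best) best)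
      = fun (best i : Int) =>
        if pvM t i "strong breakout" ∨ pvM t i "strong momentum" ∨ pvM t i "early breakout" ∨
           pvM t i "momentum building" ∨ pvM t i "breakout confirmation" then max best 3
        else if pvM t i "watch momentum" ∨ pvM t i "potential breakout" ∨
           pvM t i "momentum buildup" then max best 2 else best := by
    funext best i
    simp only [pvScored, List.foldl]
    exact pv_inner _ _ _ _ _ _ _ _ best
  rw [hstep, pv_outer]
  simp only [Bool.decide_or, pv_any_split]
  rw [pv_any_str t "strong breakout" (by decide), pv_any_str t "strong momentum" (by decide),
    pv_any_str t "early breakout" (by decide), pv_any_str t "momentum building" (by decide),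
    pv_any_str t "breakout confirmation" (by decide), pv_any_str t "watch momentum" (by decide),
    pv_any_str t "potential breakout" (by decide), pv_any_str t "momentum buildup" (by decide)]
  simp only [pvFirstHit, pvHigh, pvMedium]
  generalize PySem.Str.isIn "strong breakout" t = b1
  generalize PySem.Str.isIn "strong momentum" t = b2
  generalize PySem.Str.isIn "early breakout" t = b3
  generalize PySem.Str.isIn "momentum building" t = b4
  generalize PySem.Str.isIn "breakout confirmation" t = b5
  generalize PySem.Str.isIn "watch momentum" t = b6
  generalize PySem.Str.isIn "potential breakout" t = b7
  generalize PySem.Str.isIn "momentum buildup" t = b8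
  revert b1 b2 b3 b4 b5 b6 b7 b8
  decide
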